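-- pv_equiv track=rewrite | github.com/kapiltrip/Projectwiley | metadata/_tools/generate_html_quality_figures.py | custom_boxes
-- ===== SOURCE A (Python) =====
-- def wrap_html(text: str) -> str:
--     return (
--         text.replace("&", "&amp;")
--         .replace("<", "&lt;")
--         .replace(">", "&gt;")
--         .replace('"', "&quot;")
--     )
--
-- def custom_boxes(boxes: list[list[str]]) -> str:
--     html = ['<div class="grid four">']
--     for title, body in boxes:
--         html.append(
--             '<div class="panel"><div class="panel-title">'
--             + wrap_html(title)
--             + '</div><div class="panel-body">'
--             + wrap_html(body)
--             + "</div></div>"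
--         )
--     html.append("</div>")
--     return "".join(html)
-- ===== SOURCE B (Python) =====
-- _ESC = {"&": "&amp;", "<": "&lt;", ">": "&gt;", '"': "&quot;"}
--
--
-- def custom_boxes(boxes: list[list[str]]) -> str:
--     # Pass 1: compile the input into a flat intermediate list of
--     # (needs_escaping, text) segments describing the whole document.
--     segments = [(False, '<div class="grid four">')]
--     for title, body in boxes:
--         segments.append((False, '<div class="panel"><div class="panel-title">'))
--         segments.append((True, title))
--         segments.append((False, '</div><div class="panel-body">'))
--         segments.append((True, body))
--         segments.append((False, "</div></div>"))
--     segments.append((False, "</div>"))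
--     # Pass 2: render the segment list; marked segments are emitted
--     # character by character through the escape table.
--     out = []
--     for esc, text in segments:
--         if esc:
--             for ch in text:
--                 out.append(_ESC.get(ch, ch))
--         else:
--             out.append(text)
--     return "".join(out)
-- ===== Notes on version B (the rewrite author's own statement) =====
-- stated objective: alternative
-- what changed: B works in two staged passes over an intermediate representation: it first compiles the boxes into a flat list of (needs_escaping, text) segments, then renders that segment list, emitting marked segments character by character through an escape dict; A instead escapes each field with four chained .replace scans while concatenating panel strings in a single loop.
import Mathlib
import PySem

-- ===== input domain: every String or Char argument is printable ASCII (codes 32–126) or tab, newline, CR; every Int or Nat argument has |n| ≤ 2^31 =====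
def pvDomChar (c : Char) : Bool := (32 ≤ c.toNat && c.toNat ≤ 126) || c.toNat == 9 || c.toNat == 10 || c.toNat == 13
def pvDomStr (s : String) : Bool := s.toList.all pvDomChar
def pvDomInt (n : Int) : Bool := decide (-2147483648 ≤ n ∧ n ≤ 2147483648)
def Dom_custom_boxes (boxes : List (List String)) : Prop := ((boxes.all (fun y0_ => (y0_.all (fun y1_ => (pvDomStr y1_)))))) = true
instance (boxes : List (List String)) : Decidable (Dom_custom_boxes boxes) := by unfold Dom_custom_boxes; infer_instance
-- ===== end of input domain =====

-- B compiles the boxes into an intermediate (escape?, text) segment list and renders it in a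
-- second pass, escaping character by character via a dict, instead of A's single loop with
-- four chained replace scans per field (alternative decomposition; same output).

-- ===== PORT A =====
def wrapHtmlA (text : String) : String :=
  PySem.Str.replace
    (PySem.Str.replace
      (PySem.Str.replace
        (PySem.Str.replace text "&" "&amp;")
        "<" "&lt;")
      ">" "&gt;")
    "\"" "&quot;"

def custom_boxes (boxes : List (List String)) : String :=
  let html := boxes.foldl (fun acc box =>
    acc ++
      (match box with
      | [title, body] =>
          ["<div class=\"panel\"><div class=\"panel-title\">"
            ++ wrapHtmlA title
            ++ "</div><div class=\"panel-body\">"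
            ++ wrapHtmlA body
            ++ "</div></div>"]
      | _ => []  -- Python raises ValueError on a row that is not a pair; excluded by Pre_
      )) ["<div class=\"grid four\">"]
  String.join (html ++ ["</div>"])

-- ===== PORT B =====
-- the escape table _ESC
def escDictB : PySem.Dict Char String :=
  PySem.Dict.ofList [('&', "&amp;"), ('<', "&lt;"), ('>', "&gt;"), ('"', "&quot;")]

-- pass 1: compile the boxes into the flat segment list
def segsB (boxes : List (List String)) : List (Bool × String) :=
  (boxes.foldl (fun acc box =>
      acc ++
        (if box.length = 2 then
           [(false, "<div class=\"panel\"><div class=\"panel-title\">"),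
            (true, box[0]!),
            (false, "</div><div class=\"panel-body\">"),
            (true, box[1]!),
            (false, "</div></div>")]
         else []  -- Python raises ValueError here; excluded by Pre_
        ))
    [(false, "<div class=\"grid four\">")]) ++ [(false, "</div>")]

-- pass 2: render the segment list (escaped segments are emitted char by char via _ESC.get)
def custom_boxes_alt (boxes : List (List String)) : String :=
  let out := (segsB boxes).foldl (fun acc seg =>
    acc ++
      (if seg.1 then seg.2.toList.map (fun ch => PySem.Dict.getD escDictB ch (String.ofList [ch]))
       else [seg.2])) []
  String.join out

-- ===== PRECONDITION & SPEC =====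
-- Pre_ excludes rows that are not exactly [title, body]: Python A (and B alike) raise ValueError unpacking them.
def Pre_custom_boxes (boxes : List (List String)) : Prop :=
  (boxes.all (fun b => b.length == 2)) = true
instance (boxes : List (List String)) : Decidable (Pre_custom_boxes boxes) := by
  unfold Pre_custom_boxes; infer_instance

def pvWitness_custom_boxes : List (List String) := [["a&b", "c<d>\"e\""], ["", "x"]]

def Spec_custom_boxes (boxes : List (List String)) (out : String) : Prop := out = custom_boxes_alt boxes
instance (boxes : List (List String)) (out : String) : Decidable (Spec_custom_boxes boxes out) := by unfold Spec_custom_boxes; infer_instance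

-- ===== CLAIM (what is proved, stated in full; the proofs are below) =====
def Claim_equal_custom_boxes : Prop := ∀ (boxes : List (List String)), Dom_custom_boxes boxes → Pre_custom_boxes boxes → Spec_custom_boxes boxes (custom_boxes boxes)

-- ===== LEMMAS AND PROOFS =====

-- spec-level escape function both proofs converge to
def escCharB (c : Char) : List Char :=
  if c = '&' then "&amp;".toList
  else if c = '<' then "&lt;".toList
  else if c = '>' then "&gt;".toList
  else if c = '"' then "&quot;".toList
  else [c]

def translateB (s : String) : String := String.ofList (s.toList.flatMap escCharB)

def panelSpec (box : List String) : String :=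
  match box with
  | [title, body] =>
      "<div class=\"panel\"><div class=\"panel-title\">"
      ++ translateB title
      ++ "</div><div class=\"panel-body\">"
      ++ translateB body
      ++ "</div></div>"
  | _ => ""

-- single-character replace is a character-wise substitution
theorem replace_go_single (a : Char) (new : List Char) :
    ∀ (fuel : Nat) (l acc : List Char), l.length ≤ fuel →
      PySem.Chars.replace.go [a] new fuel l acc
        = acc.reverse ++ l.flatMap (fun c => if c = a then new else [c]) := by
  intro fuel
  induction fuel with
  | zero =>
      intro l acc h
      have : l = [] := List.eq_nil_of_length_eq_zero (Nat.le_zero.mp h)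
      subst this
      simp [PySem.Chars.replace.go]
  | succ n ih =>
      intro l acc h
      cases l with
      | nil => simp [PySem.Chars.replace.go]
      | cons c t =>
          rw [PySem.Chars.replace.go.eq_def]
          simp only [List.isPrefixOf, List.flatMap_cons]
          by_cases hc : c = a
          · subst hc
            simp only [beq_self_eq_true, Bool.true_and, if_pos]
            rw [ih _ _ (by simpa using Nat.le_of_succ_le_succ h)]
            simp
          · have hac : (a == c) = false := beq_eq_false_iff_ne.mpr (Ne.symm hc)
            rw [if_neg (by simp [hac])]
            rw [ih _ _ (by simpa using Nat.le_of_succ_le_succ h)]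
            simp [hc]

theorem replace_single (a : Char) (new s : List Char) :
    PySem.Chars.replace s [a] new = s.flatMap (fun c => if c = a then new else [c]) := by
  rw [PySem.Chars.replace]
  simp only [List.isEmpty_cons]
  · exact (replace_go_single a new s.length s [] (le_refl _)).trans (by simp)

-- the four chained single-character substitutions collapse into the one-pass table, per character
theorem esc_point (c : Char) :
    (((((if c = '&' then "&amp;".toList else [c]).flatMap
        (fun c => if c = '<' then "&lt;".toList else [c])).flatMap
        (fun c => if c = '>' then "&gt;".toList else [c])).flatMap
        (fun c => if c = '"' then "&quot;".toList else [c]))) = escCharB c := by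
  by_cases h1 : c = '&'
  · subst h1; decide
  · by_cases h2 : c = '<'
    · subst h2; decide
    · by_cases h3 : c = '>'
      · subst h3; decide
      · by_cases h4 : c = '"'
        · subst h4; decide
        · simp [escCharB, h1, h2, h3, h4]

theorem esc_chain (l : List Char) :
    ((((l.flatMap (fun c => if c = '&' then "&amp;".toList else [c])).flatMap
        (fun c => if c = '<' then "&lt;".toList else [c])).flatMap
        (fun c => if c = '>' then "&gt;".toList else [c])).flatMap
        (fun c => if c = '"' then "&quot;".toList else [c])) = l.flatMap escCharB := by
  induction l with
  | nil => simp
  | cons c t ih =>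
      simp only [List.flatMap_cons, List.flatMap_append]
      rw [ih, esc_point]

theorem wrapHtmlA_eq_translateB (t : String) : wrapHtmlA t = translateB t := by
  unfold wrapHtmlA translateB PySem.Str.replace
  refine congrArg String.ofList ?_
  have ha : "&".toList = ['&'] := rfl
  have hl : "<".toList = ['<'] := rfl
  have hg : ">".toList = ['>'] := rfl
  have hq : "\"".toList = ['"'] := rfl
  rw [ha, hl, hg, hq]
  simp only [String.toList_ofList, replace_single]
  exact esc_chain t.toList

-- the dict lookup of B's renderer is the table escape, per character
theorem eget_eq (c : Char) :
    PySem.Dict.getD escDictB c (String.ofList [c]) = String.ofList (escCharB c) := by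
  by_cases h1 : c = '&'
  · subst h1; decide
  · by_cases h2 : c = '<'
    · subst h2; decide
    · by_cases h3 : c = '>'
      · subst h3; decide
      · by_cases h4 : c = '"'
        · subst h4; decide
        · simp [escDictB, PySem.Dict.ofList, PySem.Dict.update, List.foldl,
            PySem.Dict.getD_insert, PySem.Dict.getD_empty, escCharB, h1, h2, h3, h4]

theorem join_map_eget (l : List Char) :
    String.join (l.map (fun ch => PySem.Dict.getD escDictB ch (String.ofList [ch])))
      = String.ofList (l.flatMap escCharB) := by
  apply String.toList_injective
  simp [eget_eq, Function.comp_def, List.flatMap_def]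

theorem join_singleton (s : String) : String.join [s] = s := by
  apply String.toList_injective; simp

theorem join_cons (s : String) (l : List String) :
    String.join (s :: l) = s ++ String.join l := by
  apply String.toList_injective; simp

theorem join_append (l₁ l₂ : List String) :
    String.join (l₁ ++ l₂) = String.join l₁ ++ String.join l₂ := by
  apply String.toList_injective
  simp

theorem join_flatMap {α : Type} (g : α → List String) (l : List α) :
    String.join (l.flatMap g) = String.join (l.map (fun x => String.join (g x))) := by
  induction l with
  | nil => simp
  | cons x t ih => simp [join_append, join_cons, ih]

-- the pieces B's renderer emits for one well-formed box join to that box's panel string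
def pieceB (seg : Bool × String) : List String :=
  if seg.1 then seg.2.toList.map (fun ch => PySem.Dict.getD escDictB ch (String.ofList [ch]))
  else [seg.2]

theorem join_box_pieces (title body : String) :
    String.join ([(false, "<div class=\"panel\"><div class=\"panel-title\">"),
        (true, title), (false, "</div><div class=\"panel-body\">"),
        (true, body), (false, "</div></div>")].flatMap pieceB)
      = panelSpec [title, body] := by
  simp only [List.flatMap_cons, List.flatMap_nil, List.append_nil, pieceB]
  simp only [if_pos, if_neg, Bool.false_eq_true, not_false_iff]
  rw [join_append, join_append, join_append, join_append]
  simp [join_singleton, join_map_eget, panelSpec, translateB, String.append_assoc]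

theorem flatMap_singleton_map {α β : Type} (f : α → β) (l : List α) :
    l.flatMap (fun x => [f x]) = l.map f := by
  induction l with
  | nil => rfl
  | cons a t ih => simp [ih]

-- ===== VERDICT (by name: the statement is the Claim_ definition above) =====
theorem custom_boxes_spec : Claim_equal_custom_boxes := by
  intro boxes _hdom hpre
  unfold Spec_custom_boxes
  have hlen : ∀ box ∈ boxes, box.length = 2 := by
    intro box hbox
    have := List.all_eq_true.mp hpre box hbox
    simpa using this
  -- A's side: header ++ join (map panelSpec) ++ footer
  have hA : custom_boxes boxes
      = "<div class=\"grid four\">" ++ String.join (boxes.map panelSpec) ++ "</div>" := by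
    show String.join ((boxes.foldl (fun acc box =>
      acc ++
        (match box with
        | [title, body] =>
            ["<div class=\"panel\"><div class=\"panel-title\">"
              ++ wrapHtmlA title
              ++ "</div><div class=\"panel-body\">"
              ++ wrapHtmlA body
              ++ "</div></div>"]
        | _ => []))
      ["<div class=\"grid four\">"]) ++ ["</div>"]) = _
    have hcongr : ∀ (acc : List String) (box : List String), box ∈ boxes →
        acc ++
          (match box with
          | [title, body] =>
              ["<div class=\"panel\"><div class=\"panel-title\">"
                ++ wrapHtmlA title
                ++ "</div><div class=\"panel-body\">"
                ++ wrapHtmlA body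
                ++ "</div></div>"]
          | _ => []) = acc ++ [panelSpec box] := by
      intro acc box hbox
      match box, hlen box hbox with
      | [title, body], _ => simp [panelSpec, wrapHtmlA_eq_translateB]
    have key : (boxes.foldl (fun acc box =>
        acc ++
          (match box with
          | [title, body] =>
              ["<div class=\"panel\"><div class=\"panel-title\">"
                ++ wrapHtmlA title
                ++ "</div><div class=\"panel-body\">"
                ++ wrapHtmlA body
                ++ "</div></div>"]
          | _ => []))
        ["<div class=\"grid four\">"])
        = boxes.foldl (fun acc box => acc ++ [panelSpec box]) ["<div class=\"grid four\">"] :=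
      PySem.List.foldl_congr_mem boxes _ _ _ hcongr
    rw [key]
    rw [PySem.List.foldl_append_eq_flatMap]
    rw [join_append, join_append, join_singleton, join_singleton]
    rw [flatMap_singleton_map panelSpec boxes]
  -- B's side: the compiled segments render to the same shape
  have hsegs : segsB boxes
      = [(false, "<div class=\"grid four\">")]
        ++ boxes.flatMap (fun box =>
            if box.length = 2 then
              [(false, "<div class=\"panel\"><div class=\"panel-title\">"),
               (true, box[0]!), (false, "</div><div class=\"panel-body\">"),
               (true, box[1]!), (false, "</div></div>")]
            else [])
        ++ [(false, "</div>")] := by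
    unfold segsB
    rw [PySem.List.foldl_append_eq_flatMap]
  have hB : custom_boxes_alt boxes
      = "<div class=\"grid four\">" ++ String.join (boxes.map panelSpec) ++ "</div>" := by
    show String.join ((segsB boxes).foldl (fun acc seg =>
      acc ++
        (if seg.1 then seg.2.toList.map (fun ch => PySem.Dict.getD escDictB ch (String.ofList [ch]))
         else [seg.2])) []) = _
    rw [show (fun (acc : List String) (seg : Bool × String) =>
        acc ++ (if seg.1 then seg.2.toList.map
          (fun ch => PySem.Dict.getD escDictB ch (String.ofList [ch])) else [seg.2]))
        = (fun acc seg => acc ++ pieceB seg) from rfl]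
    rw [PySem.List.foldl_append_eq_flatMap, hsegs]
    simp only [List.nil_append, List.flatMap_append, List.flatMap_cons, List.flatMap_nil,
      List.append_nil]
    rw [join_append, join_append, List.flatMap_assoc, join_flatMap]
    have hmid : boxes.map (fun box => String.join (List.flatMap pieceB
        (if box.length = 2 then
            ([(false, "<div class=\"panel\"><div class=\"panel-title\">"),
              (true, box[0]!), (false, "</div><div class=\"panel-body\">"),
              (true, box[1]!), (false, "</div></div>")] : List (Bool × String))
          else [])))
        = boxes.map panelSpec := by
      apply List.map_congr_left
      intro box hbox
      match box, hlen box hbox with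
      | [title, body], _ =>
          simpa using join_box_pieces title body
    rw [hmid]
    simp [pieceB, join_singleton]
  rw [hA, hB]
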